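-- pv_equiv track=rewrite | github.com/Taruu/backrooms-scripts | utls/wikidot_normalize.py | merge_multi_categories
-- ===== SOURCE A (Python) =====
-- def merge_multi_categories(text: str) -> str:
--     indices = []
--     first = True
--
--     # Find all colons except the last
--     for idx, ch in enumerate(reversed(text)):
--         if ch != ':':
--             continue
--
--         if first:
--             first = False
--             continue
--
--         indices.append(len(text) - idx - 1)
--
--     # Replace all colons with dashes
--     text_list = list(text)  # Convert string to list to mutate it
--     for idx in indices:
--         text_list[idx] = '-'
--
--     return ''.join(text_list)
-- ===== SOURCE B (Python) =====
-- def merge_multi_categories(text: str) -> str: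
--     # Single reverse pass: keep the first colon seen (i.e. the last one in
--     # text), dash every later-seen colon; no index list, no list mutation.
--     out = []
--     seen = False
--     for ch in reversed(text):
--         if ch == ':' and seen:
--             out.append('-')
--         else:
--             out.append(ch)
--             seen = seen or ch == ':'
--     return ''.join(reversed(out))
-- ===== Notes on version B (the rewrite author's own statement) =====
-- stated objective: simpler
-- what changed: A's two phases (reverse scan collecting an index list of all colons but the last, then mutating a char list at those indices) are replaced by a single reverse pass that builds the output directly with one boolean flag recording whether a colon was seen, with no index arithmetic or mutation.
import Mathlib
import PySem

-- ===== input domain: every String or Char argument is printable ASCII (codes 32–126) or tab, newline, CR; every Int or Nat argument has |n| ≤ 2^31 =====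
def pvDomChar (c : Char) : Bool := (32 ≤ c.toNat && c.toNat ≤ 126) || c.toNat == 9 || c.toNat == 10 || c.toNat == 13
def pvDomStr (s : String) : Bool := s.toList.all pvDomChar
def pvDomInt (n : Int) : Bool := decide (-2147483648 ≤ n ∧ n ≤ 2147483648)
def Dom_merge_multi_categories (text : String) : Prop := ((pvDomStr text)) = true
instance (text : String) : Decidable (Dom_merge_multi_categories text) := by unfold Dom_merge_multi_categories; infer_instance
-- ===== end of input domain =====

-- B replaces A's two phases (collect indices of all colons but the last, then mutate a
-- char list) by one reverse pass with a boolean flag building the output directly (simpler).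

-- ===== PORT A =====
-- loop body of A's first loop: skip non-colons, skip the first colon (reversed order), record len-idx-1
def mergeStepA (n : Int) (st : List Int × Bool) (p : Int × Char) : List Int × Bool :=
  if p.2 ≠ ':' then st
  else if st.2 then (st.1, false)
  else (st.1 ++ [n - p.1 - 1], st.2)

def merge_multi_categories (text : String) : String :=
  String.ofList
    ((((PySem.List.enumerate text.toList.reverse 0).foldl
        (mergeStepA (text.toList.length : Int)) ([], true)).1).foldl
      (fun tl idx => PySem.List.pySetD tl idx '-') text.toList)

-- ===== PORT B =====
-- loop body of B's single reverse pass
def mergeStepB (st : List Char × Bool) (ch : Char) : List Char × Bool :=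
  if ch == ':' && st.2 then (st.1 ++ ['-'], st.2)
  else (st.1 ++ [ch], st.2 || (ch == ':'))

def merge_multi_categories_alt (text : String) : String :=
  String.ofList ((text.toList.reverse.foldl mergeStepB ([], false)).1.reverse)

-- ===== PRECONDITION & SPEC =====
def Spec_merge_multi_categories (text : String) (out : String) : Prop := out = merge_multi_categories_alt text
instance (text : String) (out : String) : Decidable (Spec_merge_multi_categories text out) := by unfold Spec_merge_multi_categories; infer_instance

-- ===== CLAIM (what is proved, stated in full; the proofs are below) =====
def Claim_equal_merge_multi_categories : Prop := ∀ (text : String), Dom_merge_multi_categories text → Spec_merge_multi_categories text (merge_multi_categories text)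

-- ===== LEMMAS AND PROOFS =====

def repC (c : Char) : Char := if c = ':' then '-' else c

def colsA (n : Int) : List Char → Int → List Int
  | [], _ => []
  | c :: t, s => if c = ':' then (n - s - 1) :: colsA n t (s + 1) else colsA n t (s + 1)

lemma foldB_no_colon (t : List Char) (h : ':' ∉ t) (out0 : List Char) :
    t.foldl mergeStepB (out0, false) = (out0 ++ t, false) := by
  induction t generalizing out0 with
  | nil => simp
  | cons c t ih =>
    have hc : c ≠ ':' := fun hc => h (hc ▸ List.mem_cons_self)
    have ht : ':' ∉ t := fun hm => h (List.mem_cons_of_mem _ hm)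
    have hb : (c == ':') = false := beq_eq_false_iff_ne.mpr hc
    rw [List.foldl_cons,
        show mergeStepB (out0, false) c = (out0 ++ [c], false) from by
          simp [mergeStepB, hb],
        ih ht]
    simp

lemma foldB_true (t : List Char) (out0 : List Char) :
    t.foldl mergeStepB (out0, true) = (out0 ++ t.map repC, true) := by
  induction t generalizing out0 with
  | nil => simp
  | cons c t ih =>
    by_cases hc : c = ':' <;> simp [List.foldl_cons, mergeStepB, hc, ih, repC]

lemma foldA_no_colon (n : Int) (t : List Char) (h : ':' ∉ t) (s : Int)
    (inds0 : List Int) (first : Bool) :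
    (PySem.List.enumerate t s).foldl (mergeStepA n) (inds0, first) = (inds0, first) := by
  induction t generalizing s with
  | nil => simp [PySem.List.enumerate_nil]
  | cons c t ih =>
    have hc : c ≠ ':' := fun hc => h (hc ▸ List.mem_cons_self)
    have ht : ':' ∉ t := fun hm => h (List.mem_cons_of_mem _ hm)
    simp [PySem.List.enumerate_cons, List.foldl_cons, mergeStepA, hc, ih ht]

lemma foldA_false (n : Int) (t : List Char) (s : Int) (inds0 : List Int) :
    (PySem.List.enumerate t s).foldl (mergeStepA n) (inds0, false)
      = (inds0 ++ colsA n t s, false) := by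
  induction t generalizing s inds0 with
  | nil => simp [PySem.List.enumerate_nil, colsA]
  | cons c t ih =>
    by_cases hc : c = ':' <;>
      simp [PySem.List.enumerate_cons, List.foldl_cons, mergeStepA, hc, colsA, ih]

lemma mem_colsA (n : Int) (t : List Char) (s : Int) (x : Int) :
    x ∈ colsA n t s ↔ ∃ i : Nat, ∃ hi : i < t.length, t[i] = ':' ∧ x = n - (s + i) - 1 := by
  induction t generalizing s with
  | nil => simp [colsA]
  | cons c t ih =>
    by_cases hc : c = ':'
    · subst hc
      rw [show colsA n (':' :: t) s = (n - s - 1) :: colsA n t (s + 1) from by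
        simp [colsA]]
      simp only [List.mem_cons, ih]
      constructor
      · rintro (h | ⟨i, hi, h1, h2⟩)
        · refine ⟨0, by simp, by simp, ?_⟩
          push_cast; omega
        · refine ⟨i + 1, by simp; omega, by simpa using h1, ?_⟩
          push_cast at h2 ⊢; omega
      · rintro ⟨i, hi, h1, h2⟩
        cases i with
        | zero =>
          left; push_cast at h2; omega
        | succ i =>
          right
          refine ⟨i, by simpa using hi, by simpa using h1, ?_⟩
          push_cast at h2 ⊢; omega
    · rw [show colsA n (c :: t) s = colsA n t (s + 1) from by simp [colsA, hc]]
      rw [ih]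
      constructor
      · rintro ⟨i, hi, h1, h2⟩
        refine ⟨i + 1, by simp; omega, by simpa using h1, ?_⟩
        push_cast at h2 ⊢; omega
      · rintro ⟨i, hi, h1, h2⟩
        cases i with
        | zero => exact absurd (by simpa using h1) hc
        | succ i =>
          refine ⟨i, by simpa using hi, by simpa using h1, ?_⟩
          push_cast at h2 ⊢; omega

lemma setFold_len (inds : List Int) (tl : List Char) :
    (inds.foldl (fun tl idx => PySem.List.pySetD tl idx '-') tl).length = tl.length := by
  induction inds generalizing tl with
  | nil => rfl
  | cons i inds ih => simp [List.foldl_cons, ih, PySem.List.length_pySetD]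

lemma setFold_get (inds : List Int) (hn : ∀ x ∈ inds, 0 ≤ x) (tl : List Char)
    (j : Nat) (hj : j < tl.length) :
    (inds.foldl (fun tl idx => PySem.List.pySetD tl idx '-') tl)[j]?
      = some (if (j : Int) ∈ inds then '-' else tl[j]) := by
  induction inds generalizing tl with
  | nil => simp [List.getElem?_eq_getElem hj]
  | cons i inds ih =>
    have hi : 0 ≤ i := hn i List.mem_cons_self
    have hn' : ∀ x ∈ inds, 0 ≤ x := fun x hx => hn x (List.mem_cons_of_mem _ hx)
    have hset : PySem.List.pySetD tl i '-' = tl.set i.toNat '-' :=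
      PySem.List.pySetD_of_nonneg tl '-' hi
    have hlen : (PySem.List.pySetD tl i '-').length = tl.length := by simp [hset]
    rw [List.foldl_cons, ih hn' _ (by rw [hlen]; exact hj)]
    by_cases hmem : (j : Int) ∈ inds
    · simp [hmem]
    · by_cases hji : (j : Int) = i
      · have h2 : i.toNat = j := by omega
        simp [hji, hset, h2]
      · have h2 : i.toNat ≠ j := by omega
        simp [hji, hmem, hset, h2]

lemma first_colon_split (t : List Char) (h : ':' ∈ t) :
    ∃ u v, t = u ++ ':' :: v ∧ ':' ∉ u := by
  induction t with
  | nil => simp at h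
  | cons c t ih =>
    by_cases hc : c = ':'
    · exact ⟨[], t, by simp [hc], by simp⟩
    · have h' : ':' ∈ t := by
        rcases List.mem_cons.1 h with h1 | h1
        · exact absurd h1.symm hc
        · exact h1
      rcases ih h' with ⟨u, v, h1, h2⟩
      refine ⟨c :: u, v, by simp [h1], ?_⟩
      intro hx
      rcases List.mem_cons.1 hx with h3 | h3
      · exact hc h3.symm
      · exact h2 h3

-- ===== VERDICT (by name: the statement is the Claim_ definition above) =====
theorem merge_multi_categories_spec : Claim_equal_merge_multi_categories := by
  intro text _
  unfold Spec_merge_multi_categories merge_multi_categories merge_multi_categories_alt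
  by_cases hcol : ':' ∈ text.toList.reverse
  · rcases first_colon_split _ hcol with ⟨u, v, hsplit, hu⟩
    have hcs : text.toList = v.reverse ++ ':' :: u.reverse := by
      have := congrArg List.reverse hsplit
      simpa using this
    have hlen : text.toList.length = u.length + 1 + v.length := by
      rw [hcs]; simp; omega
    -- B side
    rw [hsplit, List.foldl_append, foldB_no_colon u hu, List.foldl_cons]
    have hstep : mergeStepB ([] ++ u, false) ':' = (u ++ [':'], true) := by
      simp [mergeStepB]
    rw [hstep, foldB_true]
    -- A side
    rw [PySem.List.enumerate_append, List.foldl_append,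
        foldA_no_colon _ u hu, PySem.List.enumerate_cons, List.foldl_cons]
    have hstepA : mergeStepA (text.toList.length : Int) ([], true) (0 + (u.length : Int), ':')
        = ([], false) := by simp [mergeStepA]
    rw [hstepA, foldA_false]
    set n : Int := (text.toList.length : Int) with hn
    set s0 : Int := 0 + (u.length : Int) + 1 with hs0
    show String.ofList
        (List.foldl (fun tl idx => PySem.List.pySetD tl idx '-') text.toList (colsA n v s0))
      = String.ofList (u ++ [':'] ++ v.map repC).reverse
    -- membership characterisation
    have hmem : ∀ j : Nat, ((j : Int) ∈ colsA n v s0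
        ↔ j < v.length ∧ v.reverse[j]? = some ':') := by
      intro j
      rw [mem_colsA]
      constructor
      · rintro ⟨i, hi, h1, h2⟩
        have hj : j = v.length - 1 - i := by
          rw [hn, hs0] at h2; rw [hlen] at h2; push_cast at h2; omega
        have hjv : j < v.length := by omega
        refine ⟨hjv, ?_⟩
        have hjr : j < v.reverse.length := by simpa using hjv
        rw [List.getElem?_eq_getElem hjr, List.getElem_reverse]
        have : v.length - 1 - j = i := by omega
        simp [this, h1]
      · rintro ⟨hjv, h1⟩
        refine ⟨v.length - 1 - j, by omega, ?_, ?_⟩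
        · have hjr : j < v.reverse.length := by simpa using hjv
          rw [List.getElem?_eq_getElem hjr, List.getElem_reverse] at h1
          simpa using h1
        · rw [hn, hs0, hlen]; push_cast; omega
    have hpos : ∀ x ∈ colsA n v s0, 0 ≤ x := by
      intro x hx
      rcases (mem_colsA n v s0 x).1 hx with ⟨i, hi, _, h2⟩
      rw [hn, hs0, hlen] at h2; push_cast at h2; omega
    -- pointwise equality
    apply congrArg String.ofList
    apply List.ext_getElem
    · simp [setFold_len, hcs]
    · intro j hj1 hj2
      have hjcs : j < text.toList.length := by simpa [setFold_len] using hj1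
      have hA : (((colsA n v s0).foldl (fun tl idx => PySem.List.pySetD tl idx '-') text.toList))[j]'hj1
          = if (j : Int) ∈ colsA n v s0 then '-' else text.toList[j]'hjcs := by
        have h := setFold_get _ hpos text.toList j hjcs
        rw [List.getElem?_eq_getElem hj1] at h
        exact Option.some.inj h
      have hRB : (u ++ [':'] ++ v.map repC).reverse = (v.map repC).reverse ++ ':' :: u.reverse := by
        simp
      rw [hA, List.getElem_of_eq hRB]
      by_cases hc1 : j < v.length
      · -- inside the dashed prefix
        have hjr : j < v.reverse.length := by simpa using hc1
        have hL : text.toList[j]'hjcs = v.reverse[j]'hjr := by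
          simp only [hcs]
          rw [List.getElem_append_left hjr]
        have hR : ((v.map repC).reverse ++ ':' :: u.reverse)[j]'(hRB ▸ hj2)
            = repC (v.reverse[j]'hjr) := by
          rw [List.getElem_append_left (by simpa using hc1)]
          rw [List.getElem_reverse, List.getElem_reverse]
          simp [List.getElem_map]
        rw [hR]
        by_cases hm : (j : Int) ∈ colsA n v s0
        · rw [if_pos hm]
          rcases (hmem j).1 hm with ⟨-, hcolon⟩
          rw [List.getElem?_eq_getElem hjr] at hcolon
          have hvj : v.reverse[j]'hjr = ':' := by simpa using hcolon
          rw [hvj]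
          simp [repC]
        · rw [if_neg hm, hL]
          have hne : v.reverse[j]'hjr ≠ ':' := by
            intro hq
            exact hm ((hmem j).2 ⟨hc1, by rw [List.getElem?_eq_getElem hjr, hq]⟩)
          simp only [repC]
          rw [if_neg hne]
      · -- the kept colon and the untouched tail
        have hmemf : ¬ ((j : Int) ∈ colsA n v s0) := by
          intro hm
          rcases (hmem j).1 hm with ⟨h1, -⟩
          omega
        rw [if_neg hmemf]
        have hLeq : text.toList[j]'hjcs
            = (v.reverse ++ ':' :: u.reverse)[j]'(by rw [← hcs]; exact hjcs) := by
          simp only [hcs]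
        rw [hLeq,
            List.getElem_append_right (as := v.reverse) (by simp only [List.length_reverse]; omega),
            List.getElem_append_right (as := (v.map repC).reverse)
              (by simp only [List.length_reverse, List.length_map]; omega)]
        congr 1
        simp
  · -- no colon at all
    rw [foldB_no_colon _ hcol, foldA_no_colon _ _ hcol]
    simp
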